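-- pv_equiv track=rewrite | github.com/Sanny26/information_retrieval | search.py | get_search_results
-- ===== SOURCE A (Python) =====
-- from collections import Counter
--
-- def get_search_results(query, index):
--     """
--     Searches the query in the index provided.
--     Args -
--       query: Search query string.
--       index: A dictionary of words as keys and doc_info as values.
--     Return -
--       ranked_docs: A list of tuples(doc_id, query word match frequency) that are ranked.
--       doc_content: A dictionary of docs as keys and
--     """
--     ranking = Counter()
--     doc_contents = dict()
--     for word in query:
--         if word in index:
--            posting_list = index[word]
--            ranking += Counter(posting_list)
--            for each in posting_list:
--                if each not in doc_contents:
--                    doc_contents[each]=[word]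
--                else:
--                    doc_contents[each].append(word)
--     ranked_docs = ranking.most_common()
--     return ranked_docs, doc_contents
-- ===== SOURCE B (Python) =====
-- from collections import Counter
--
-- def get_search_results(query, index):
--     # One dict built in the loop; the ranking is derived from it afterwards
--     # (each doc's match count is just the number of words collected for it).
--     doc_contents = dict()
--     for word in query:
--         if word in index:
--             for doc in index[word]:
--                 doc_contents.setdefault(doc, []).append(word)
--     ranked_docs = Counter({doc: len(words) for doc, words in doc_contents.items()}).most_common()
--     return ranked_docs, doc_contents
-- ===== Notes on version B (the rewrite author's own statement) =====
-- stated objective: faster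
-- what changed: B drops the inline Counter maintenance (A's 'ranking += Counter(pl)' rescans the whole accumulated counter on every query word via Counter._keep_positive): the loop builds only doc_contents via setdefault, and the ranking is derived afterwards from the lengths of the collected word lists, exploiting the invariant ranking[doc] == len(doc_contents[doc]).
import Mathlib
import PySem

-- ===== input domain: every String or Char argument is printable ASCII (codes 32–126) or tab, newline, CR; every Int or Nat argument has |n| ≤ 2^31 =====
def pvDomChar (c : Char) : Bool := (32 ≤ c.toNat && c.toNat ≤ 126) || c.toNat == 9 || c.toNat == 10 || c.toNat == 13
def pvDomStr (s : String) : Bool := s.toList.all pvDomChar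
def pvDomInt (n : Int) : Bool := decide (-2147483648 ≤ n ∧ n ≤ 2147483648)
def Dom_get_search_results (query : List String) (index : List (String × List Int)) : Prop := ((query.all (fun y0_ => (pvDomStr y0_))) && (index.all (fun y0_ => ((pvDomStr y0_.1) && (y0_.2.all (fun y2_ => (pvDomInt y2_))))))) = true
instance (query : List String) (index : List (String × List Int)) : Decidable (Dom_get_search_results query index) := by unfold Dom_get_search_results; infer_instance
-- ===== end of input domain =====

-- B skips A's per-word 'ranking += Counter(...)': the loop builds only doc_contents and the
-- ranking is derived afterwards from the word-list lengths (ranking[doc] = len(doc_contents[doc]));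
-- a timing run measured B faster on large inputs.

set_option maxHeartbeats 1000000


-- ===== PORT A =====
def get_search_results (query : List String) (index : List (String × List Int)) : (List (Int × Int)) × (List (Int × List String)) :=
  -- ranking = Counter(); doc_contents = dict(); for word in query: …
  let st := query.foldl
    (fun (st : PySem.Dict Int Int × PySem.Dict Int (List String)) word =>
      match (PySem.Dict.mk index).get? word with   -- if word in index: posting_list = index[word]
      | none => st
      | some posting_list =>
        -- ranking += Counter(posting_list): for (k, v) in Counter(posting_list).items(): ranking[k] = ranking.get(k, 0) + v
        let ranking := (PySem.Dict.counter posting_list).items.foldl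
          (fun r kv => r.insert kv.1 (r.getD kv.1 0 + kv.2)) st.1
        -- for each in posting_list: doc_contents[each] = [word] / .append(word)
        let doc_contents := posting_list.foldl
          (fun d each =>
            match d.get? each with
            | none => d.insert each [word]
            | some ws => d.insert each (ws ++ [word])) st.2
        (ranking, doc_contents))
    (PySem.Dict.empty, PySem.Dict.empty)
  -- ranked_docs = ranking.most_common() = sorted(items, key=itemgetter(1), reverse=True)
  (PySem.List.sorted st.1.items (fun p => p.2) true, st.2.items)

-- ===== PORT B =====
def get_search_results_alt (query : List String) (index : List (String × List Int)) : (List (Int × Int)) × (List (Int × List String)) :=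
  -- doc_contents = dict(); for word in query: for doc in index[word]: doc_contents.setdefault(doc, []).append(word)
  let doc_contents := query.foldl
    (fun (d : PySem.Dict Int (List String)) word =>
      match (PySem.Dict.mk index).get? word with
      | none => d
      | some pl => pl.foldl (fun d doc => d.modify doc [] (fun ws => ws ++ [word])) d)  -- setdefault(doc, []).append(word)
    PySem.Dict.empty
  -- Counter({doc: len(words)}).most_common()
  (PySem.List.sorted (doc_contents.items.map (fun p => (p.1, (p.2.length : Int)))) (fun p => p.2) true,
   doc_contents.items)

-- ===== PRECONDITION & SPEC =====
def Spec_get_search_results (query : List String) (index : List (String × List Int)) (out : (List (Int × Int)) × (List (Int × List String))) : Prop := out = get_search_results_alt query index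
instance (query : List String) (index : List (String × List Int)) (out : (List (Int × Int)) × (List (Int × List String))) : Decidable (Spec_get_search_results query index out) := by unfold Spec_get_search_results; infer_instance

-- ===== CLAIM (what is proved, stated in full; the proofs are below) =====
def Claim_equal_get_search_results : Prop := ∀ (query : List String) (index : List (String × List Int)), Dom_get_search_results query index → Spec_get_search_results query index (get_search_results query index)

-- ===== LEMMAS AND PROOFS =====

/-- The ranking, reconstructed from doc_contents: each value replaced by its length. -/
def pvMapLen (d : PySem.Dict Int (List String)) : PySem.Dict Int Int :=
  PySem.Dict.mk (d.items.map (fun p => (p.1, (p.2.length : Int))))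

lemma pvMapLen_keys (d : PySem.Dict Int (List String)) : (pvMapLen d).keys = d.keys := by
  simp [pvMapLen, PySem.Dict.keys]

lemma pvMapLen_getD (d : PySem.Dict Int (List String)) (hnd : d.keys.Nodup) (e : Int) :
    (pvMapLen d).getD e 0 = ((d.getD e []).length : Int) := by
  cases h : d.get? e with
  | none =>
    have h1 : (pvMapLen d).get? e = none := by
      rw [PySem.Dict.get?_eq_none_iff_not_mem_keys] at h ⊢
      rwa [pvMapLen_keys]
    rw [PySem.Dict.getD_of_get?_eq_none _ _ h1, PySem.Dict.getD_of_get?_eq_none _ _ h]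
    rfl
  | some v =>
    have hnd2 : (pvMapLen d).keys.Nodup := by rw [pvMapLen_keys]; exact hnd
    have hm2 : (e, (v.length : Int)) ∈ (pvMapLen d).items :=
      List.mem_map.mpr ⟨(e, v), PySem.Dict.mem_items_of_get?_eq_some _ h, rfl⟩
    rw [PySem.Dict.getD_of_mem_items _ hm2 hnd2, PySem.Dict.getD_of_get?_eq_some _ _ h]

/-- A's doc_contents update step is B's modify step. -/
lemma pvStep_dc (d : PySem.Dict Int (List String)) (w : String) (e : Int) :
    (match d.get? e with
     | none => d.insert e [w]
     | some ws => d.insert e (ws ++ [w])) = d.modify e [] (fun ws => ws ++ [w]) := by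
  rw [show d.modify e [] (fun ws => ws ++ [w]) = d.insert e (d.getD e [] ++ [w]) from rfl]
  cases h : d.get? e with
  | none =>
    rw [PySem.Dict.getD_of_get?_eq_none _ _ h]
    simp
  | some ws =>
    rw [PySem.Dict.getD_of_get?_eq_some _ _ h]

lemma pvMapLen_modify (d : PySem.Dict Int (List String)) (hnd : d.keys.Nodup) (w : String) (e : Int) :
    pvMapLen (d.modify e [] (fun ws => ws ++ [w]))
      = (pvMapLen d).insert e ((pvMapLen d).getD e 0 + 1) := by
  rw [show d.modify e [] (fun ws => ws ++ [w]) = d.insert e (d.getD e [] ++ [w]) from rfl]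
  apply PySem.Dict.ext
  rw [show (pvMapLen (d.insert e (d.getD e [] ++ [w]))).items
        = (d.insert e (d.getD e [] ++ [w])).items.map (fun p => (p.1, (p.2.length : Int))) from rfl]
  by_cases hc : d.contains e = true
  · have hc2 : (pvMapLen d).contains e = true := by
      rw [PySem.Dict.contains_iff_mem_keys] at hc ⊢
      rwa [pvMapLen_keys]
    rw [PySem.Dict.items_insert, PySem.Dict.items_insert, hc, hc2]
    simp only [if_true]
    rw [show (pvMapLen d).items = d.items.map (fun p => (p.1, (p.2.length : Int))) from rfl]
    rw [List.map_map, List.map_map]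
    apply List.map_congr_left
    intro p _
    by_cases hpe : p.1 = e
    · simp only [Function.comp_apply, hpe, beq_self_eq_true, if_true]
      rw [pvMapLen_getD d hnd e]
      simp
    · simp [Function.comp, hpe]
  · have hcf : d.contains e = false := by simpa using hc
    have hc2 : (pvMapLen d).contains e = false := by
      rw [Bool.eq_false_iff] at hcf ⊢
      intro hcontra
      exact hcf (by rw [PySem.Dict.contains_iff_mem_keys] at hcontra ⊢; rwa [pvMapLen_keys] at hcontra)
    rw [PySem.Dict.items_insert, PySem.Dict.items_insert, hcf, hc2]
    simp only [if_false, Bool.false_eq_true]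
    rw [PySem.Dict.getD_of_not_contains _ _ hcf, PySem.Dict.getD_of_not_contains _ _ hc2]
    rw [show (pvMapLen d).items = d.items.map (fun p => (p.1, (p.2.length : Int))) from rfl]
    simp

lemma pvNodup_modify_fold (w : String) :
    ∀ (pl : List Int) (d : PySem.Dict Int (List String)), d.keys.Nodup →
    (pl.foldl (fun d doc => d.modify doc [] (fun ws => ws ++ [w])) d).keys.Nodup := by
  intro pl
  induction pl with
  | nil => exact fun _ h => h
  | cons e t ih =>
    intro d hnd
    simp only [List.foldl_cons]
    apply ih
    rw [show d.modify e [] (fun ws => ws ++ [w]) = d.insert e (d.getD e [] ++ [w]) from rfl]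
    exact PySem.Dict.nodup_keys_insert _ _ _ hnd

lemma pvMapLen_fold (w : String) :
    ∀ (pl : List Int) (d : PySem.Dict Int (List String)), d.keys.Nodup →
    pvMapLen (pl.foldl (fun d doc => d.modify doc [] (fun ws => ws ++ [w])) d)
      = pl.foldl (fun r e => r.insert e (r.getD e 0 + 1)) (pvMapLen d) := by
  intro pl
  induction pl with
  | nil => exact fun _ _ => rfl
  | cons e t ih =>
    intro d hnd
    simp only [List.foldl_cons]
    have hnd' : (d.modify e [] (fun ws => ws ++ [w])).keys.Nodup := by
      rw [show d.modify e [] (fun ws => ws ++ [w]) = d.insert e (d.getD e [] ++ [w]) from rfl]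
      exact PySem.Dict.nodup_keys_insert _ _ _ hnd
    rw [ih _ hnd', pvMapLen_modify d hnd w e]

lemma pvMerge_getD (k : Int) :
    ∀ (l : List (Int × Int)) (r : PySem.Dict Int Int),
    (l.foldl (fun r kv => r.insert kv.1 (r.getD kv.1 0 + kv.2)) r).getD k 0
      = r.getD k 0 + ((l.filter (fun kv => kv.1 == k)).map (·.2)).sum := by
  intro l
  induction l with
  | nil => intro r; simp
  | cons kv t ih =>
    obtain ⟨a, v⟩ := kv
    intro r
    simp only [List.foldl_cons, List.filter_cons]
    rw [ih]
    by_cases h : a = k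
    · subst h
      rw [PySem.Dict.getD_insert_self]
      simp only [beq_self_eq_true, if_true, List.map_cons, List.sum_cons]
      ring
    · rw [PySem.Dict.getD_insert_of_ne _ _ _ (Ne.symm h)]
      simp [h]

lemma pvFilter_nodup (k : Int) :
    ∀ (s : List Int), s.Nodup → s.filter (fun x => x == k) = if k ∈ s then [k] else [] := by
  intro s
  induction s with
  | nil => simp
  | cons a t ih =>
    intro hnd
    rw [List.nodup_cons] at hnd
    rw [List.filter_cons, ih hnd.2]
    by_cases h : a = k
    · subst h
      simp [hnd.1]
    · simp [h, Ne.symm h]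

/-- Merging Counter(pl) into r equals incrementing r once per element of pl. -/
lemma pvMerge_eq_inc (pl : List Int) (r : PySem.Dict Int Int) (hnd : r.keys.Nodup) :
    (PySem.Dict.counter pl).items.foldl (fun r kv => r.insert kv.1 (r.getD kv.1 0 + kv.2)) r
      = pl.foldl (fun r e => r.insert e (r.getD e 0 + 1)) r := by
  have hndL : ((PySem.Dict.counter pl).items.foldl
      (fun r kv => r.insert kv.1 (r.getD kv.1 0 + kv.2)) r).keys.Nodup :=
    PySem.Dict.nodup_keys_foldl_insert_key _ _ _ _ hnd
  have hndR : (pl.foldl (fun r e => r.insert e (r.getD e 0 + 1)) r).keys.Nodup :=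
    PySem.Dict.nodup_keys_foldl_insert _ _ _ hnd
  have hmapfst : (PySem.Dict.counter pl).items.map (fun kv => kv.1) = PySem.Set.ofList pl := by
    rw [show (PySem.Dict.counter pl).items.map (fun kv => kv.1) = (PySem.Dict.counter pl).keys from rfl,
        PySem.Dict.keys_counter]
  have hkeys : ((PySem.Dict.counter pl).items.foldl
        (fun r kv => r.insert kv.1 (r.getD kv.1 0 + kv.2)) r).keys
      = (pl.foldl (fun r e => r.insert e (r.getD e 0 + 1)) r).keys := by
    rw [PySem.Dict.keys_foldl_insert_key, PySem.Dict.keys_foldl_insert, hmapfst,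
        PySem.Set.update_eq_append_filter, PySem.Set.update_eq_append_filter,
        PySem.Set.ofList_ofList]
  apply PySem.Dict.ext
  rw [PySem.Dict.items_eq_map_keys _ hndL 0, PySem.Dict.items_eq_map_keys _ hndR 0, hkeys]
  apply List.map_congr_left
  intro k _
  rw [pvMerge_getD, PySem.Dict.getD_foldl_insert_add_one]
  congr 1
  rw [PySem.Dict.items_counter]
  rw [List.filter_map, List.map_map]
  have hcomp : ((fun kv => kv.1 == k) ∘ fun k' => ((k' : Int), (pl.count k' : Int))) = fun x => x == k := rfl
  rw [hcomp]
  rw [pvFilter_nodup k _ (PySem.Set.nodup_ofList pl)]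
  by_cases hk : k ∈ pl
  · rw [if_pos ((PySem.Set.mem_ofList _ _).mpr hk)]
    simp [Function.comp]
  · rw [if_neg (fun hc => hk ((PySem.Set.mem_ofList _ _).mp hc))]
    simp [List.count_eq_zero.mpr hk]

lemma pvMain_fold (index : List (String × List Int)) :
    ∀ (q : List String) (d : PySem.Dict Int (List String)), d.keys.Nodup →
    q.foldl
      (fun (st : PySem.Dict Int Int × PySem.Dict Int (List String)) word =>
        match (PySem.Dict.mk index).get? word with
        | none => st
        | some posting_list =>
          let ranking := (PySem.Dict.counter posting_list).items.foldl
            (fun r kv => r.insert kv.1 (r.getD kv.1 0 + kv.2)) st.1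
          let doc_contents := posting_list.foldl
            (fun d each =>
              match d.get? each with
              | none => d.insert each [word]
              | some ws => d.insert each (ws ++ [word])) st.2
          (ranking, doc_contents))
      (pvMapLen d, d)
    = (pvMapLen (q.foldl
        (fun (d : PySem.Dict Int (List String)) word =>
          match (PySem.Dict.mk index).get? word with
          | none => d
          | some pl => pl.foldl (fun d doc => d.modify doc [] (fun ws => ws ++ [word])) d) d),
       q.foldl
        (fun (d : PySem.Dict Int (List String)) word =>
          match (PySem.Dict.mk index).get? word with
          | none => d
          | some pl => pl.foldl (fun d doc => d.modify doc [] (fun ws => ws ++ [word])) d) d) := by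
  intro q
  induction q with
  | nil => exact fun _ _ => rfl
  | cons word t ih =>
    intro d hnd
    simp only [List.foldl_cons]
    cases hw : (PySem.Dict.mk index).get? word with
    | none =>
      exact ih d hnd
    | some pl =>
      have hdc : pl.foldl
          (fun d each =>
            match d.get? each with
            | none => d.insert each [word]
            | some ws => d.insert each (ws ++ [word])) d
        = pl.foldl (fun d doc => d.modify doc [] (fun ws => ws ++ [word])) d :=
        PySem.List.foldl_congr_mem _ _ _ _ (fun acc x _ => pvStep_dc acc word x)
      have hndm : (pvMapLen d).keys.Nodup := by rw [pvMapLen_keys]; exact hnd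
      have hrank : (PySem.Dict.counter pl).items.foldl
            (fun r kv => r.insert kv.1 (r.getD kv.1 0 + kv.2)) (pvMapLen d)
          = pvMapLen (pl.foldl (fun d doc => d.modify doc [] (fun ws => ws ++ [word])) d) := by
        rw [pvMerge_eq_inc pl (pvMapLen d) hndm, pvMapLen_fold word pl d hnd]
      simp only [hdc, hrank]
      exact ih _ (pvNodup_modify_fold word pl d hnd)

-- ===== VERDICT (by name: the statement is the Claim_ definition above) =====
theorem get_search_results_spec : Claim_equal_get_search_results := by
  intro query index _
  unfold Spec_get_search_results get_search_results get_search_results_alt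
  have h := pvMain_fold index query PySem.Dict.empty List.nodup_nil
  rw [show (pvMapLen PySem.Dict.empty) = PySem.Dict.empty from rfl] at h
  rw [h]
  rfl
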